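-- pv_equiv track=rewrite | github.com/Evercrow/Study_Projects_Echo | calculator/comput_modul.py | negative_value
-- ===== SOURCE A (Python) =====
-- def negative_value(string_arg):             #Модуль обработки отрицательных значений
--     string_arg += ' '
--     set = {'+', '-', '*', ':', '^',  ' '}
--     list_string = list(string_arg)
--     if list_string[0] == '-':
--         list_string[1] = '-' + list_string[1]
--         list_string = list_string[1:]
--     long = len(list_string)
--     i = 1
--     while i < long:
--         if list_string[i] == '-' and list_string[i-1] in set:
--             list_string[i+1] = '-' + list_string[i+1]
--             list_string.pop(i)
--             long -=1
--         i +=1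
--     return list_string
-- ===== SOURCE B (Python) =====
-- SET = {'+', '-', '*', ':', '^', ' '}
--
-- def negative_value(string_arg):
--     chars = list(string_arg + ' ')
--     out = []
--     i = 0
--     if chars[0] == '-':
--         out.append('-' + chars[1])
--         i = 2
--     while i < len(chars):
--         c = chars[i]
--         if c == '-' and out and out[-1] in SET:
--             out.append('-' + chars[i + 1])
--             i += 2
--         else:
--             out.append(c)
--             i += 1
--     return out
-- ===== Notes on version B (the rewrite author's own statement) =====
-- stated objective: alternative
-- what changed: Replaced A's index-walk over a mutable char list, which overwrites the next slot and pops the current one at every merged minus sign, by a single forward pass with a lookahead that appends finished tokens to a fresh output list and never mutates a shared list.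
import Mathlib
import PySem

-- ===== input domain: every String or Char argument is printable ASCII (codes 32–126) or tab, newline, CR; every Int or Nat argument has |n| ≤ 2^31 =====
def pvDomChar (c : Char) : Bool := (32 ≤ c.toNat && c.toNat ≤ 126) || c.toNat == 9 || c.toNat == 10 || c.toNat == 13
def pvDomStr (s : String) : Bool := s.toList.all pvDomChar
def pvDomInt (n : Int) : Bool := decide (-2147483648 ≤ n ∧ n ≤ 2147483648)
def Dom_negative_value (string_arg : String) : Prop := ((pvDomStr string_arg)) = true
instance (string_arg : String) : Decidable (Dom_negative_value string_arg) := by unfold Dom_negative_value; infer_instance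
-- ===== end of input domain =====

-- B replaces A's scan-with-pop over a mutable char list by a single forward
-- pass that appends tokens to an output list ('-' after an operator is merged
-- into the next char via lookahead); objective: alternative one-pass algorithm.

-- ===== PORT A =====
-- the while loop: i advances, a merge overwrites slot i+1 and pops slot i.
-- list accesses are via getD: Python's indexing never goes out of range here
-- (the appended ' ' is never merged), so getD is exact.
def negLoopA (l : List String) (i : Nat) : List String :=
  if h : i < l.length then
    if (l.getD i "" == "-") && ((["+", "-", "*", ":", "^", " "] : List String).contains (l.getD (i-1) "")) then
      negLoopA ((l.set (i+1) ("-" ++ l.getD (i+1) "")).eraseIdx i) (i+1)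
    else
      negLoopA l (i+1)
  else l
termination_by l.length - i
decreasing_by
  · have hs : ((l.set (i+1) ("-" ++ l.getD (i+1) "")).eraseIdx i).length = l.length - 1 := by
      rw [List.length_eraseIdx_of_lt (by simpa using h)]; simp
    omega
  · omega

-- body of A on the char list of string_arg + ' '
def negBodyA (chars : List Char) : List String :=
  let list0 := chars.map String.singleton                   -- list(string_arg)
  let list1 :=
    if list0.getD 0 "" == "-" then
      (list0.set 1 ("-" ++ list0.getD 1 "")).drop 1         -- list_string[1:]
    else list0
  negLoopA list1 1

def negative_value (string_arg : String) : List String :=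
  negBodyA ((string_arg ++ " ").toList)

-- ===== PORT B =====
-- out[-1] in SET (false when out is empty)
def negPrevSet (prev : Option String) : Bool :=
  match prev with
  | some p => (["+", "-", "*", ":", "^", " "] : List String).contains p
  | none => false

-- single pass over the remaining chars, out is built in reverse
def negLoopB (out : List String) : List Char → List String
  | [] => out.reverse
  | c :: rest =>
    if (String.singleton c == "-") && negPrevSet out.head? then
      match rest with
      | d :: rest' => negLoopB (("-" ++ String.singleton d) :: out) rest'
      | [] => negLoopB (String.singleton c :: out) []   -- unreachable: the appended ' ' is last
    else negLoopB (String.singleton c :: out) rest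

-- body of B on the char list of string_arg + ' '
def negBodyB : List Char → List String
  | '-' :: d :: rest => negLoopB [("-" ++ String.singleton d)] rest   -- initial '-' merged, i = 2
  | chars => negLoopB [] chars

def negative_value_alt (string_arg : String) : List String :=
  negBodyB ((string_arg ++ " ").toList)

-- ===== PRECONDITION & SPEC =====
def Spec_negative_value (string_arg : String) (out : List String) : Prop := out = negative_value_alt string_arg
instance (string_arg : String) (out : List String) : Decidable (Spec_negative_value string_arg out) := by unfold Spec_negative_value; infer_instance

-- ===== CLAIM (what is proved, stated in full; the proofs are below) =====
def Claim_equal_negative_value : Prop := ∀ (string_arg : String), Dom_negative_value string_arg → Spec_negative_value string_arg (negative_value string_arg)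

-- ===== LEMMAS AND PROOFS =====

-- common abstraction of both loops: process raw chars `rest`, `prev` the token just before
def negRun (prev : Option String) : List Char → List String
  | [] => []
  | c :: rest =>
    if (String.singleton c == "-") && negPrevSet prev then
      match rest with
      | d :: rest' => ("-" ++ String.singleton d) :: negRun (some ("-" ++ String.singleton d)) rest'
      | [] => [String.singleton c]
    else String.singleton c :: negRun (some (String.singleton c)) rest

theorem singleton_inj {c d : Char} (h : String.singleton c = String.singleton d) : c = d := by
  have := congrArg String.toList h; simpa [String.singleton] using this

theorem getD_append_len (P : List String) (x : String) (xs : List String) (d : String) :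
    (P ++ x :: xs).getD P.length d = x := by
  simp [List.getD]

theorem eraseIdx_append_len (P : List String) (x : String) (xs : List String) :
    (P ++ x :: xs).eraseIdx P.length = P ++ xs := by
  induction P with
  | nil => simp
  | cons a t ih => simp [ih]

theorem getD_append_last (P : List String) (x : String) (R : List String) (d : String) :
    ((P ++ [x]) ++ R).getD ((P ++ [x]).length - 1) d = x := by
  simp [List.getD]

-- B's loop in terms of negRun
theorem negLoopB_eq (out : List String) (rest : List Char) :
    negLoopB out rest = out.reverse ++ negRun out.head? rest := by
  induction out, rest using negLoopB.induct with
  | case1 out => simp [negLoopB, negRun]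
  | case2 out c hcond d rest' ih =>
      rw [negLoopB, negRun]
      simp only [hcond, if_true]
      rw [ih]; simp
  | case3 out c hcond _ =>
      rw [negLoopB, negRun]
      simp only [hcond, if_true]
      rw [negLoopB]; simp
  | case4 out c rest hcond ih =>
      rw [negLoopB.eq_def, negRun.eq_def]
      simp only [hcond, Bool.false_eq_true, if_false]
      rw [ih]; simp

theorem getD_append_len1 (L : List String) (x y : String) (ys : List String) (d : String) :
    (L ++ x :: y :: ys).getD (L.length + 1) d = y := by
  simp [List.getD]

theorem set_append_len1 (L : List String) (x y v : String) (ys : List String) :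
    (L ++ x :: y :: ys).set (L.length + 1) v = L ++ x :: v :: ys := by
  simp

-- A's loop in terms of negRun: the list is processed-prefix (P ++ [x]) ++ raw chars,
-- the index sits at the boundary, and the raw suffix never ends in '-'.
theorem negLoopA_eq (n : Nat) : ∀ (rest : List Char) (P : List String) (x : String),
    rest.length ≤ n → rest.getLast? ≠ some '-' →
    negLoopA ((P ++ [x]) ++ rest.map String.singleton) (P ++ [x]).length
      = (P ++ [x]) ++ negRun (some x) rest := by
  induction n with
  | zero =>
      intro rest P x hlen _
      have : rest = [] := by cases rest <;> simp_all
      subst this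
      rw [negLoopA]
      simp [negRun]
  | succ n ih =>
      intro rest P x hlen hlast
      cases rest with
      | nil =>
          rw [negLoopA]; simp [negRun]
      | cons c rest2 =>
          rw [negLoopA]
          simp only [List.map_cons]
          have hlt : (P ++ [x]).length < ((P ++ [x]) ++ String.singleton c :: rest2.map String.singleton).length := by
            simp
          rw [dif_pos hlt, getD_append_len, getD_append_last]
          by_cases hcond : ((String.singleton c == "-") && ((["+", "-", "*", ":", "^", " "] : List String).contains x)) = true
          · -- merge: c is '-' and the previous token is in the operator set
            rw [if_pos hcond]
            have hc : c = '-' := by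
              have hb : (String.singleton c == "-") = true := by
                cases h1 : (String.singleton c == "-") <;> simp_all
              exact singleton_inj (by simpa using hb)
            cases rest2 with
            | nil =>
                exfalso; apply hlast; simp [hc]
            | cons d rest3 =>
                simp only [List.map_cons]
                rw [getD_append_len1, set_append_len1, eraseIdx_append_len]
                have hstep : (P ++ [x]) ++ ("-" ++ String.singleton d) :: rest3.map String.singleton
                    = ((P ++ [x]) ++ ["-" ++ String.singleton d]) ++ rest3.map String.singleton := by
                  simp
                have hlen3 : rest3.length ≤ n := by simp at hlen; omega
                have hlast3 : rest3.getLast? ≠ some '-' := by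
                  cases rest3 with
                  | nil => simp
                  | cons e t =>
                      intro hcon; apply hlast
                      rw [List.getLast?_cons_cons, List.getLast?_cons_cons]; exact hcon
                have hrec := ih rest3 (P ++ [x]) ("-" ++ String.singleton d) hlen3 hlast3
                rw [show (P ++ [x]).length + 1 = ((P ++ [x]) ++ ["-" ++ String.singleton d]).length by simp]
                rw [hstep, hrec, negRun]
                simp only [negPrevSet]
                rw [if_pos hcond]
                simp
          · rw [if_neg hcond]
            have hstep : (P ++ [x]) ++ String.singleton c :: rest2.map String.singleton
                = ((P ++ [x]) ++ [String.singleton c]) ++ rest2.map String.singleton := by simp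
            have hlen2 : rest2.length ≤ n := by simp at hlen; omega
            have hlast2 : rest2.getLast? ≠ some '-' := by
              cases rest2 with
              | nil => simp
              | cons e t =>
                  intro hcon; apply hlast
                  rw [List.getLast?_cons_cons]; exact hcon
            have hrec := ih rest2 (P ++ [x]) (String.singleton c) hlen2 hlast2
            rw [show (P ++ [x]).length + 1 = ((P ++ [x]) ++ [String.singleton c]).length by simp]
            rw [hstep, hrec]
            have hrun : negRun (some x) (c :: rest2)
                = String.singleton c :: negRun (some (String.singleton c)) rest2 := by
              cases rest2 with
              | nil => simp only [negRun, negPrevSet]; rw [if_neg hcond]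
              | cons d r => simp only [negRun, negPrevSet]; rw [if_neg hcond]
            rw [hrun]
            simp

-- top level, stated on the raw char list (always ends in the appended ' ')
theorem main_eq (chars : List Char) (h : chars.getLast? = some ' ') :
    negBodyA chars = negBodyB chars := by
  unfold negBodyB
  split
  · -- chars = '-' :: d :: rest
    rename_i d rest
    have hco : (String.singleton '-' == "-") = true := by decide
    simp only [negBodyA, List.map_cons, List.getD_cons_zero, List.getD_cons_succ, hco, if_true,
      List.set_cons_succ, List.set_cons_zero, List.drop_succ_cons, List.drop_zero]
    have hlast : rest.getLast? ≠ some '-' := by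
      cases rest with
      | nil => simp
      | cons e t =>
          intro hcon
          rw [List.getLast?_cons_cons, List.getLast?_cons_cons] at h
          rw [hcon] at h; simp at h
    have hA := negLoopA_eq rest.length rest [] ("-" ++ String.singleton d) le_rfl hlast
    rw [negLoopB_eq]
    simp only [List.head?_cons, List.reverse_cons, List.reverse_nil, List.nil_append]
    simpa using hA
  · -- default: chars does not start with '-' followed by another char
    rename_i hno
    cases chars with
    | nil => simp at h
    | cons c0 tl =>
        by_cases hc0 : c0 = '-'
        · subst hc0
          cases tl with
          | nil => simp at h
          | cons d rest => exact absurd rfl (hno d rest)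
        · have hsc : (String.singleton c0 == "-") = false := by
            cases hb : (String.singleton c0 == "-")
            · rfl
            · exfalso; exact hc0 (singleton_inj (by simpa using hb))
          simp only [negBodyA, List.map_cons, List.getD_cons_zero, hsc, Bool.false_eq_true,
            if_false]
          have hlast : tl.getLast? ≠ some '-' := by
            cases tl with
            | nil => simp
            | cons e t =>
                intro hcon
                rw [List.getLast?_cons_cons] at h
                rw [hcon] at h; simp at h
          have hA := negLoopA_eq tl.length tl [] (String.singleton c0) le_rfl hlast
          rw [negLoopB_eq]
          simp only [List.head?_nil, List.reverse_nil, List.nil_append]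
          have hrun : negRun none (c0 :: tl)
              = String.singleton c0 :: negRun (some (String.singleton c0)) tl := by
            rw [negRun.eq_def]
            simp [negPrevSet]
          rw [hrun]
          simpa using hA

-- ===== VERDICT (by name: the statement is the Claim_ definition above) =====
theorem negative_value_spec : Claim_equal_negative_value := by
  intro s _
  unfold Spec_negative_value negative_value negative_value_alt
  have htl : (s ++ " ").toList = s.toList ++ [' '] := by simp
  rw [htl]
  exact main_eq (s.toList ++ [' ']) (by simp)
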